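-- pv_equiv track=rewrite | github.com/v1centebarros/mei-aa-p3 | src/utils.py | calculate_total_and_unique_characters
-- ===== SOURCE A (Python) =====
-- def calculate_total_and_unique_characters(text):
--     total_characters = 0
--     unique_characters = set()
--     for letter in text:
--         if letter.isalpha():
--             total_characters += 1
--             unique_characters.add(letter)
--     return total_characters, unique_characters
-- ===== SOURCE B (Python) =====
-- def calculate_total_and_unique_characters(text):
--     chars = list(text)
--     unique_characters = {c for c in chars if c.isalpha()}
--     total_characters = sum(chars.count(c) for c in unique_characters)
--     return total_characters, unique_characters
-- ===== Notes on version B (the rewrite author's own statement) =====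
-- stated objective: alternative
-- what changed: Instead of A's single pass maintaining a running counter and a set together, B first computes the set of distinct alphabetic characters and then derives the total as the sum over that set of each character's occurrence count in the text (total = sum of multiplicities of the distinct letters).
import Mathlib
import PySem

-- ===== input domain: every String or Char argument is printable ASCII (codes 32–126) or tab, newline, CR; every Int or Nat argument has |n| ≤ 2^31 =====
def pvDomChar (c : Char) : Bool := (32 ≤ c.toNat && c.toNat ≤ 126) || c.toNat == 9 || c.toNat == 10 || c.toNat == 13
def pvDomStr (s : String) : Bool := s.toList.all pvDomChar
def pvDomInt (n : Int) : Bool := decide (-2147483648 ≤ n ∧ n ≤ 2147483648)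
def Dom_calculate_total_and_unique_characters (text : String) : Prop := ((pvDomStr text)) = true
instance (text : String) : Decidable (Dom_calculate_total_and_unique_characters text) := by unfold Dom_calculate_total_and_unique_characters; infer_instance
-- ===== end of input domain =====

-- B computes the distinct alphabetic characters first and then obtains the total as the sum,
-- over that set, of each character's occurrence count in the text; objective: alternative.

-- ===== PORT A =====
-- one pass over the text, maintaining a counter and a set together
def calculate_total_and_unique_characters (text : String) : Int × List String :=
  text.toList.foldl
    (fun (acc : Int × PySem.Set String) letter =>
      if PySem.Chars.strIsalpha [letter] then
        (acc.1 + 1, PySem.Set.add acc.2 (String.ofList [letter]))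
      else acc)
    ((0 : Int), PySem.Set.empty)

-- ===== PORT B =====
-- distinct alphabetic characters first, then total = sum of their occurrence counts.
-- Python's one-character strings are carried as Char and rendered as String at the
-- return boundary, per the type convention.
def calculate_total_and_unique_characters_alt (text : String) : Int × List String :=
  let chars := text.toList
  let unique : PySem.Set Char :=
    PySem.Set.ofList (chars.filter (fun c => PySem.Chars.strIsalpha [c]))
  let total : Int := unique.foldl (fun acc c => acc + (chars.count c : Int)) 0
  (total, unique.map (fun c => String.ofList [c]))

-- ===== PRECONDITION & SPEC =====
def Spec_calculate_total_and_unique_characters (text : String) (out : Int × List String) : Prop := out = calculate_total_and_unique_characters_alt text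
instance (text : String) (out : Int × List String) : Decidable (Spec_calculate_total_and_unique_characters text out) := by unfold Spec_calculate_total_and_unique_characters; infer_instance

-- ===== CLAIM (what is proved, stated in full; the proofs are below) =====
def Claim_equal_calculate_total_and_unique_characters : Prop := ∀ (text : String), Dom_calculate_total_and_unique_characters text → Spec_calculate_total_and_unique_characters text (calculate_total_and_unique_characters text)

-- ===== LEMMAS AND PROOFS =====

-- loop invariant: A's fold from any accumulator equals filtered-length and the set of the filtered suffix
theorem pv_fold_invariant (cs : List Char) (n : Int) (s : PySem.Set String) :
    cs.foldl
      (fun (acc : Int × PySem.Set String) letter =>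
        if PySem.Chars.strIsalpha [letter] then
          (acc.1 + 1, PySem.Set.add acc.2 (String.ofList [letter]))
        else acc)
      (n, s)
    = (n + ((cs.filter (fun c => PySem.Chars.strIsalpha [c])).length : Int),
       ((cs.filter (fun c => PySem.Chars.strIsalpha [c])).map (fun c => String.ofList [c])).foldl PySem.Set.add s) := by
  induction cs generalizing n s with
  | nil => simp
  | cons c cs ih =>
    by_cases h : PySem.Chars.strIsalpha [c]
    · simp [List.foldl_cons, h, ih]
      ring
    · simp [List.foldl_cons, h, ih]

-- an injective map commutes with Set.add
theorem pv_add_map {α β : Type} [DecidableEq α] [DecidableEq β]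
    (f : α → β) (hf : Function.Injective f) (s : PySem.Set α) (x : α) :
    (PySem.Set.add s x).map f = PySem.Set.add (s.map f) (f x) := by
  simp only [PySem.Set.add, PySem.Set.contains, List.contains_iff_mem]
  by_cases h : x ∈ s
  · simp [h, List.mem_map_of_injective hf]
  · simp [h, List.mem_map_of_injective hf]

-- an injective map commutes with Set.ofList
theorem pv_ofList_map {α β : Type} [DecidableEq α] [DecidableEq β]
    (f : α → β) (hf : Function.Injective f) (xs : List α) :
    PySem.Set.ofList (xs.map f) = (PySem.Set.ofList xs).map f := by
  induction xs using List.reverseRecOn with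
  | nil => rfl
  | append_singleton xs x ih =>
    rw [List.map_append, List.map_singleton, PySem.Set.ofList_append_singleton,
      PySem.Set.ofList_append_singleton, ih, pv_add_map f hf]

-- summing a function over a fold
theorem pv_foldl_add_eq_sum {α : Type} (f : α → Int) (l : List α) (a : Int) :
    l.foldl (fun acc x => acc + f x) a = a + (l.map f).sum := by
  induction l generalizing a with
  | nil => simp
  | cons x l ih => simp [List.foldl_cons, ih]; ring

-- the sum of occurrence counts over the distinct elements is the length
theorem pv_sum_counts (l : List Char) :
    ((PySem.Set.ofList l).map (fun c => (l.count c : Int))).sum = (l.length : Int) := by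
  have hperm : ((PySem.Set.ofList l).map (fun c => (l.count c : Int))).sum
      = (l.dedup.map (fun c => (l.count c : Int))).sum := by
    refine List.Perm.sum_eq (List.Perm.map _ ?_)
    exact (List.perm_ext_iff_of_nodup (PySem.Set.nodup_ofList l) l.nodup_dedup).mpr
      (fun a => by rw [PySem.Set.mem_ofList, List.mem_dedup])
  rw [hperm]
  calc ((l.dedup.map fun x => (l.count x : Int))).sum
      = (((l.dedup.map fun x => l.count x).map (fun n : Nat => (n : Int)))).sum := by
        rw [List.map_map]; rfl
    _ = (l.length : Int) := by
        rw [← Nat.cast_list_sum, List.sum_map_count_dedup_eq_length]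

-- singleton-string rendering is injective
theorem pv_inj : Function.Injective (fun c : Char => String.ofList [c]) := by
  intro a b h
  have := congrArg String.toList h
  simpa using this

-- ===== VERDICT (by name: the statement is the Claim_ definition above) =====
theorem calculate_total_and_unique_characters_spec : Claim_equal_calculate_total_and_unique_characters := by
  intro text _
  show _ = _
  unfold calculate_total_and_unique_characters calculate_total_and_unique_characters_alt
  rw [pv_fold_invariant]
  set cs := text.toList with hcs
  set fl := cs.filter (fun c => PySem.Chars.strIsalpha [c]) with hfl
  have hsnd : (fl.map (fun c => String.ofList [c])).foldl PySem.Set.add PySem.Set.empty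
      = (PySem.Set.ofList fl).map (fun c => String.ofList [c]) := by
    show PySem.Set.ofList (fl.map (fun c => String.ofList [c])) = _
    exact pv_ofList_map _ pv_inj fl
  have hfst : (PySem.Set.ofList fl).foldl (fun acc c => acc + (cs.count c : Int)) 0
      = (fl.length : Int) := by
    rw [pv_foldl_add_eq_sum]
    have hcong : (PySem.Set.ofList fl).map (fun c => (cs.count c : Int))
        = (PySem.Set.ofList fl).map (fun c => (fl.count c : Int)) := by
      refine List.map_congr_left (fun c hc => ?_)
      have hmem : c ∈ fl := (PySem.Set.mem_ofList fl c).mp hc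
      have halpha : PySem.Chars.strIsalpha [c] = true := (List.mem_filter.mp hmem).2
      exact (congrArg (fun n : Nat => (n : Int))
        (List.count_filter (p := fun x => PySem.Chars.strIsalpha [x]) (a := c) halpha)).symm
    rw [hcong, pv_sum_counts, zero_add]
  simp only []
  rw [hsnd, hfst]
  rw [hfl]
  simp
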